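-- pv_equiv track=rewrite | github.com/rahulsamant37/Daily-Task | learn-language/learn-python/strick/python_question_880.py | longest_increasing_subsequence_with_modification
-- ===== SOURCE A (Python) =====
-- def longest_increasing_subsequence_with_modification(nums, k):
--     """
--     Finds the length of the longest increasing subsequence (LIS) of nums after applying at most k modifications.
--
--     Args:
--         nums: A list of integers.
--         k: The maximum number of modifications allowed.
--
--     Returns:
--         The length of the LIS after at most k modifications.
--     """
--
--     n = len(nums)
--     dp = [[0] * (k + 1) for _ in range(n)]  # dp[i][j] is the length of LIS ending at nums[i] with j modifications used.
--
--     for i in range(n):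
--         for j in range(k + 1):
--             dp[i][j] = 1  # Initialize with 1 (the element itself).
--
--             # Iterate through previous elements
--             for p in range(i):
--                 # If nums[i] >= nums[p], we can extend the LIS without modification.
--                 if nums[i] >= nums[p]:
--                     dp[i][j] = max(dp[i][j], dp[p][j] + 1)
--                 # If nums[i] < nums[p], we can extend the LIS with one modification (if modifications are available)
--                 elif j > 0:
--                     dp[i][j] = max(dp[i][j], dp[p][j - 1] + 1)
--
--     # Find the maximum length among all possible ending indices and modification counts.
--     max_len = 0
--     for i in range(n):
--         for j in range(k + 1):
--             max_len = max(max_len, dp[i][j])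
--
--     return max_len
-- ===== SOURCE B (Python) =====
-- def _query(front, x):
--     # front: Pareto front of (value, length), strictly increasing in both.
--     # Returns the best length among entries with value <= x (0 if none).
--     q = 0
--     for (v, l) in front:
--         if v <= x:
--             q = l
--         else:
--             break
--     return q
--
--
-- def _insert(front, x, l):
--     # Insert (x, l) keeping the front Pareto-optimal and sorted (requires l > _query(front, x)).
--     lo = [e for e in front if e[0] < x]
--     hi = [e for e in front if e[0] >= x and e[1] > l]
--     return lo + [(x, l)] + hi
--
--
-- def longest_increasing_subsequence_with_modification(nums, k):
--     # Column-by-column over the modification budget j; inside a column the inner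
--     # scan over previous indices is replaced by a Pareto front keyed by value
--     # (prefix-max structure) plus a running maximum of the previous column
--     # (valid because dp is monotone in the budget).
--     best = 0
--     prev = None
--     for _ in range(k + 1):
--         front = []
--         cur = []
--         prevmax = 0
--         for i in range(len(nums)):
--             x = nums[i]
--             length = _query(front, x) + 1
--             if prev is not None and prevmax + 1 > length:
--                 length = prevmax + 1
--             cur.append(length)
--             if length > best:
--                 best = length
--             if prev is not None and prev[i] > prevmax:
--                 prevmax = prev[i]
--             front = _insert(front, x, length)
--         prev = cur
--     return best
-- ===== Notes on version B (the rewrite author's own statement) =====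
-- stated objective: faster
-- what changed: Replaces A's inner scan over all previous indices by a maintained Pareto front (value-keyed prefix-max structure) queried per element, and replaces the modification branch by a running maximum of the previous budget column, justified by monotonicity of the dp in the budget.
import Mathlib
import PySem

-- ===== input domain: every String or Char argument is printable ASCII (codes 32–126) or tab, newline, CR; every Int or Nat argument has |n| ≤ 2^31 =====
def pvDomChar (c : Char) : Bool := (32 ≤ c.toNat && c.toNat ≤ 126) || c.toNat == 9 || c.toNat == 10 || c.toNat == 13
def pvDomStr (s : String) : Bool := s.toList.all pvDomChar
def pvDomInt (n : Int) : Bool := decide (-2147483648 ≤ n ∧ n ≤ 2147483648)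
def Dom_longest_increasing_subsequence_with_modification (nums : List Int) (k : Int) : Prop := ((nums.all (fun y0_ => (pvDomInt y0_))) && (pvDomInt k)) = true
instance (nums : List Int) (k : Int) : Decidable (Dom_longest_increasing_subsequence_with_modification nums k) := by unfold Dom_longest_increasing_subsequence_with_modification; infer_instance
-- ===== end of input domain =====

-- B replaces A's inner scan over all previous indices by a maintained Pareto front (a
-- value-keyed prefix-max structure) plus a running maximum of the previous budget column
-- (valid because the dp is monotone in the budget); same return value, proved equal.


-- ===== PORT A =====
def longest_increasing_subsequence_with_modification (nums : List Int) (k : Int) : Int :=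
  let n := nums.length
  let kk := (k + 1).toNat  -- [0]*(k+1): empty when k+1 ≤ 0, exact
  let dp0 := List.replicate n (List.replicate kk (0 : Int))
  let dp := (List.range n).foldl (fun dp i =>
    (List.range kk).foldl (fun dp j =>
      -- dp[i][j] = 1, then the p-loop of max-updates, as an accumulator
      let v := (List.range i).foldl (fun v p =>
        if nums.getD i 0 ≥ nums.getD p 0 then  -- indices i, p are < len nums: getD is exact
          max v ((dp.getD p []).getD j 0 + 1)
        else if 0 < j then
          max v ((dp.getD p []).getD (j - 1) 0 + 1)
        else v) 1
      dp.set i ((dp.getD i []).set j v)) dp) dp0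
  (List.range n).foldl (fun m i =>
    (List.range kk).foldl (fun m j => max m ((dp.getD i []).getD j 0)) m) 0

-- ===== PORT B =====
-- _query: walk the sorted front, remembering the last length whose value is ≤ x; break at the first larger value
def pvQueryAux (x : Int) : List (Int × Int) → Int → Int
  | [], q => q
  | e :: rest, q => if e.1 ≤ x then pvQueryAux x rest e.2 else q

def pvQuery (front : List (Int × Int)) (x : Int) : Int := pvQueryAux x front 0

-- _insert: entries with smaller value, then (x, l), then surviving (non-dominated) larger entries
def pvInsertF (front : List (Int × Int)) (x l : Int) : List (Int × Int) :=
  (front.filter (fun e => decide (e.1 < x))) ++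
    (x, l) :: (front.filter (fun e => decide (x ≤ e.1) && decide (l < e.2)))

-- body of B's inner loop (state: front, cur, prevmax, best)
def pvStepB (nums : List Int) (prev? : Option (List Int))
    (t : List (Int × Int) × List Int × Int × Int) (i : Nat) :
    List (Int × Int) × List Int × Int × Int :=
  let front := t.1
  let cur := t.2.1
  let prevmax := t.2.2.1
  let best := t.2.2.2
  let x := nums.getD i 0  -- i < len nums: getD is exact
  let len0 := pvQuery front x + 1
  let length := match prev? with
    | some _ => if prevmax + 1 > len0 then prevmax + 1 else len0
    | none => len0
  let best' := if length > best then length else best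
  let prevmax' := match prev? with
    | some pv => if pv.getD i 0 > prevmax then pv.getD i 0 else prevmax
    | none => prevmax
  (pvInsertF front x length, cur ++ [length], prevmax', best')

def longest_increasing_subsequence_with_modification_alt (nums : List Int) (k : Int) : Int :=
  ((List.range (k + 1).toNat).foldl (fun (s : Int × Option (List Int)) _ =>
      let r := (List.range nums.length).foldl (pvStepB nums s.2) ([], [], 0, s.1)
      (r.2.2.2, some r.2.1)) ((0 : Int), (none : Option (List Int)))).1

-- ===== PRECONDITION & SPEC =====
def Spec_longest_increasing_subsequence_with_modification (nums : List Int) (k : Int) (out : Int) : Prop := out = longest_increasing_subsequence_with_modification_alt nums k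
instance (nums : List Int) (k : Int) (out : Int) : Decidable (Spec_longest_increasing_subsequence_with_modification nums k out) := by unfold Spec_longest_increasing_subsequence_with_modification; infer_instance

-- ===== CLAIM (what is proved, stated in full; the proofs are below) =====
def Claim_equal_longest_increasing_subsequence_with_modification : Prop := ∀ (nums : List Int) (k : Int), Dom_longest_increasing_subsequence_with_modification nums k → Spec_longest_increasing_subsequence_with_modification nums k (longest_increasing_subsequence_with_modification nums k)

-- ===== LEMMAS AND PROOFS =====

-- ---- small list-access helpers ----
theorem pvGetDAppendLeft {α : Type} (l₁ l₂ : List α) (p : Nat) (d : α) (h : p < l₁.length) :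
    (l₁ ++ l₂).getD p d = l₁.getD p d := by
  simp [List.getD_eq_getElem?_getD, List.getElem?_append_left h]

theorem pvGetDAppendAt {α : Type} (l₁ : List α) (x : α) (l₂ : List α) (d : α) :
    (l₁ ++ x :: l₂).getD l₁.length d = x := by
  simp [List.getD_eq_getElem?_getD]

theorem pvGetDSetNe {α : Type} (l : List α) (i p : Nat) (x d : α) (h : i ≠ p) :
    (l.set i x).getD p d = l.getD p d := by
  simp [List.getD_eq_getElem?_getD, List.getElem?_set_ne h]

theorem pvGetDSetEq {α : Type} (l : List α) (i : Nat) (x d : α) (h : i < l.length) :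
    (l.set i x).getD i d = x := by
  simp [List.getD_eq_getElem?_getD, h]

theorem pvSetAppend {α : Type} (l₁ : List α) (x : α) (l₂ : List α) (v : α) :
    (l₁ ++ x :: l₂).set l₁.length v = l₁ ++ v :: l₂ := by
  induction l₁ with
  | nil => rfl
  | cons y ys ih => simp [ih]

theorem pvSetSelf {α : Type} (l : List α) (i : Nat) (d : α) (h : l.getD i d = d) :
    l.set i d = l := by
  apply List.ext_getElem?
  intro j
  by_cases hij : i = j
  · subst hij
    by_cases hl : i < l.length
    · rw [List.getElem?_set_self hl, List.getElem?_eq_getElem hl]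
      rw [List.getD_eq_getElem?_getD, List.getElem?_eq_getElem hl] at h
      simp only [Option.getD_some] at h
      rw [h]
    · rw [List.set_eq_of_length_le (by omega)]
  · rw [List.getElem?_set_ne hij]

theorem pvMapRangeGetD (f : Nat → Int) (kk j : Nat) (h : j < kk) :
    ((List.range kk).map f).getD j 0 = f j := by
  rw [List.getD_eq_getElem?_getD, List.getElem?_map, List.getElem?_range h]
  rfl

theorem pvFoldCongr {α β : Type} (l : List α) (f g : β → α → β)
    (h : ∀ b a, a ∈ l → f b a = g b a) : ∀ b, l.foldl f b = l.foldl g b := by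
  induction l with
  | nil => intro b; rfl
  | cons x xs ih =>
    intro b
    simp only [List.foldl_cons, h b x (by simp)]
    exact ih (fun b a ha => h b a (by simp [ha])) _

-- ---- generic max-fold lemmas ----
theorem pvFoldGeInit {α : Type} (g : Int → α → Int) (l : List α)
    (h : ∀ m a, a ∈ l → m ≤ g m a) : ∀ b, b ≤ l.foldl g b := by
  induction l with
  | nil => intro b; exact le_refl b
  | cons a as ih =>
    intro b
    exact le_trans (h b a (by simp))
      (ih (fun m a' ha' => h m a' (by simp [ha'])) (g b a))

theorem pvFoldLe {α : Type} (g : Int → α → Int) (l : List α) (c : Int)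
    (h : ∀ m a, a ∈ l → m ≤ c → g m a ≤ c) : ∀ b, b ≤ c → l.foldl g b ≤ c := by
  induction l with
  | nil => intro b hb; exact hb
  | cons a as ih =>
    intro b hb
    exact ih (fun m a' ha' => h m a' (by simp [ha'])) (g b a) (h b a (by simp) hb)

theorem pvFoldGeMem {α : Type} [DecidableEq α] (g : Int → α → Int) (l : List α)
    (hmono : ∀ m a, a ∈ l → m ≤ g m a) (a : α) (ha : a ∈ l) (c : Int)
    (hc : ∀ m, c ≤ g m a) : ∀ b, c ≤ l.foldl g b := by
  induction l with
  | nil => cases ha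
  | cons a0 as ih =>
    intro b
    by_cases he : a = a0
    · subst he
      exact le_trans (hc b)
        (pvFoldGeInit g as (fun m a' ha' => hmono m a' (by simp [ha'])) (g b a))
    · have ha' : a ∈ as := by
        cases List.mem_cons.mp ha with
        | inl h => exact absurd h he
        | inr h => exact h
      exact ih (fun m a' h' => hmono m a' (by simp [h'])) ha' (g b a0)

theorem pvFoldLeFold {α : Type} (g1 g2 : Int → α → Int) (l : List α)
    (h : ∀ v w a, a ∈ l → v ≤ w → g1 v a ≤ g2 w a) :
    ∀ v w, v ≤ w → l.foldl g1 v ≤ l.foldl g2 w := by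
  induction l with
  | nil => intro v w hvw; exact hvw
  | cons a as ih =>
    intro v w hvw
    exact ih (fun v' w' a' ha' => h v' w' a' (by simp [ha'])) _ _ (h v w a (by simp) hvw)

theorem pvIfMax (v c : Int) : (if c > v then c else v) = max v c := by
  simp only [gt_iff_lt, max_def]
  split_ifs <;> omega

-- ---- the row-major model of A's dp table ----
def pvRowVal (nums : List Int) (rows : List (List Int)) (i j : Nat) : Int :=
  (List.range i).foldl (fun v p =>
    if nums.getD i 0 ≥ nums.getD p 0 then
      max v ((rows.getD p []).getD j 0 + 1)
    else if 0 < j then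
      max v ((rows.getD p []).getD (j - 1) 0 + 1)
    else v) 1

def pvRows (nums : List Int) (kk : Nat) : Nat → List (List Int)
  | 0 => []
  | m + 1 => pvRows nums kk m ++ [(List.range kk).map (pvRowVal nums (pvRows nums kk m) m)]

def pvE (nums : List Int) (kk i j : Nat) : Int :=
  ((pvRows nums kk nums.length).getD i []).getD j 0

theorem pvRowsLength (nums : List Int) (kk : Nat) : ∀ m, (pvRows nums kk m).length = m := by
  intro m; induction m with
  | zero => rfl
  | succ q ih => simp [pvRows, ih]

theorem pvRowsGetD (nums : List Int) (kk : Nat) :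
    ∀ m i, i < m → (pvRows nums kk m).getD i []
      = (List.range kk).map (pvRowVal nums (pvRows nums kk i) i) := by
  intro m
  induction m with
  | zero => intro i hi; omega
  | succ q ih =>
    intro i hi
    rcases Nat.lt_or_ge i q with h | h
    · rw [pvRows, pvGetDAppendLeft _ _ _ _ (by rw [pvRowsLength]; exact h)]
      exact ih i h
    · have hiq : i = q := by omega
      subst hiq
      rw [pvRows]
      have := pvGetDAppendAt (pvRows nums kk i)
        ((List.range kk).map (pvRowVal nums (pvRows nums kk i) i)) [] []
      rw [pvRowsLength] at this
      exact this

theorem pvRowValCongr (nums : List Int) (rows₁ rows₂ : List (List Int)) (i j : Nat)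
    (h : ∀ p, p < i → rows₁.getD p [] = rows₂.getD p []) :
    pvRowVal nums rows₁ i j = pvRowVal nums rows₂ i j := by
  unfold pvRowVal
  exact pvFoldCongr _ _ _ (fun v p hp => by
    rw [h p (List.mem_range.mp hp)]) 1

theorem pvEEq (nums : List Int) (kk i j : Nat) (hi : i < nums.length) (hj : j < kk) :
    pvE nums kk i j = pvRowVal nums (pvRows nums kk i) i j := by
  unfold pvE
  rw [pvRowsGetD nums kk nums.length i hi, pvMapRangeGetD _ _ _ hj]

theorem pvRowsEntry (nums : List Int) (kk i p j : Nat) (hp : p < i)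
    (hpn : p < nums.length) (hj : j < kk) :
    ((pvRows nums kk i).getD p []).getD j 0 = pvE nums kk p j := by
  rw [pvRowsGetD nums kk i p hp, pvMapRangeGetD _ _ _ hj]
  exact (pvEEq nums kk p j hpn hj).symm

-- A's dp cell as a fold over pvE values
theorem pvRowValE (nums : List Int) (kk i j : Nat) (hi : i ≤ nums.length) (hj : j < kk) :
    pvRowVal nums (pvRows nums kk i) i j
      = (List.range i).foldl (fun v p =>
          if nums.getD i 0 ≥ nums.getD p 0 then max v (pvE nums kk p j + 1)
          else if 0 < j then max v (pvE nums kk p (j - 1) + 1)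
          else v) 1 := by
  unfold pvRowVal
  refine pvFoldCongr _ _ _ (fun v p hp => ?_) 1
  have hpi : p < i := List.mem_range.mp hp
  rw [pvRowsEntry nums kk i p j hpi (by omega) hj,
    pvRowsEntry nums kk i p (j - 1) hpi (by omega) (by omega)]

-- ---- A's table equals pvRows (port A unfolding) ----
theorem pvInnerGen (nums : List Int) (base : List (List Int)) (i : Nat) (hi : i < base.length) :
    ∀ (jl : List Nat) (r : List Int),
      jl.foldl (fun dp j => dp.set i ((dp.getD i []).set j
          ((List.range i).foldl (fun v p =>
            if nums.getD i 0 ≥ nums.getD p 0 then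
              max v ((dp.getD p []).getD j 0 + 1)
            else if 0 < j then
              max v ((dp.getD p []).getD (j - 1) 0 + 1)
            else v) 1))) (base.set i r)
        = base.set i (jl.foldl (fun r j => r.set j (pvRowVal nums base i j)) r) := by
  intro jl
  induction jl with
  | nil => intro r; rfl
  | cons j js ih =>
    intro r
    simp only [List.foldl_cons]
    have hrow : (base.set i r).getD i [] = r := pvGetDSetEq _ _ _ _ hi
    have hval : (List.range i).foldl (fun v p =>
        if nums.getD i 0 ≥ nums.getD p 0 then
          max v (((base.set i r).getD p []).getD j 0 + 1)
        else if 0 < j then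
          max v (((base.set i r).getD p []).getD (j - 1) 0 + 1)
        else v) 1 = pvRowVal nums base i j := by
      refine pvFoldCongr _ _ _ (fun v p hp => ?_) 1
      rw [pvGetDSetNe _ _ _ _ _ (by have := List.mem_range.mp hp; omega)]
    rw [hrow, hval, List.set_set]
    exact ih (r.set j (pvRowVal nums base i j))

theorem pvSetFoldMap (f : Nat → Int) (kk : Nat) :
    ∀ c a, a + c = kk →
      (List.range' a c).foldl (fun r j => r.set j (f j))
          (((List.range a).map f) ++ List.replicate c 0)
        = (List.range kk).map f := by
  intro c
  induction c with
  | zero => intro a ha; simp; rw [← ha]; simp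
  | succ c ih =>
    intro a ha
    rw [List.range'_succ]
    simp only [List.foldl_cons, List.replicate_succ]
    have hset : (((List.range a).map f) ++ (0 : Int) :: List.replicate c 0).set a (f a)
        = ((List.range (a + 1)).map f) ++ List.replicate c 0 := by
      have h1 : (((List.range a).map f) ++ (0 : Int) :: List.replicate c 0).set
          ((List.range a).map f).length (f a)
          = ((List.range a).map f) ++ (f a) :: List.replicate c 0 := pvSetAppend _ _ _ _
      simp only [List.length_map, List.length_range] at h1
      rw [h1, List.range_succ, List.map_append]
      simp
    rw [hset]
    exact ih (a + 1) (by omega)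

theorem pvOuterAll (nums : List Int) (kk : Nat) :
    ∀ c i, (List.range' i c).foldl (fun dp i =>
        (List.range kk).foldl (fun dp j =>
          dp.set i ((dp.getD i []).set j
            ((List.range i).foldl (fun v p =>
              if nums.getD i 0 ≥ nums.getD p 0 then
                max v ((dp.getD p []).getD j 0 + 1)
              else if 0 < j then
                max v ((dp.getD p []).getD (j - 1) 0 + 1)
              else v) 1))) dp) (pvRows nums kk i ++ List.replicate c (List.replicate kk 0))
      = pvRows nums kk (i + c) := by
  intro c
  induction c with
  | zero => intro i; simp
  | succ c ih =>
    intro i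
    rw [List.range'_succ]
    simp only [List.foldl_cons]
    have hstep : (List.range kk).foldl (fun dp j =>
        dp.set i ((dp.getD i []).set j
          ((List.range i).foldl (fun v p =>
            if nums.getD i 0 ≥ nums.getD p 0 then
              max v ((dp.getD p []).getD j 0 + 1)
            else if 0 < j then
              max v ((dp.getD p []).getD (j - 1) 0 + 1)
            else v) 1)))
        (pvRows nums kk i ++ List.replicate (c + 1) (List.replicate kk 0))
        = pvRows nums kk (i + 1) ++ List.replicate c (List.replicate kk 0) := by
      set zrow := List.replicate kk (0 : Int) with hzrow
      set base := pvRows nums kk i ++ List.replicate (c + 1) zrow with hbase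
      have hlen : i < base.length := by
        rw [hbase]; simp [pvRowsLength]
      have hgetd : base.getD i zrow = zrow := by
        rw [hbase, List.replicate_succ]
        have := pvGetDAppendAt (pvRows nums kk i) zrow (List.replicate c zrow) zrow
        rw [pvRowsLength] at this
        exact this
      have hself : base = base.set i zrow := (pvSetSelf base i zrow hgetd).symm
      rw [hself, pvInnerGen nums base i hlen (List.range kk) zrow]
      have hfold : (List.range kk).foldl
          (fun r j => r.set j (pvRowVal nums base i j)) zrow
          = (List.range kk).map (pvRowVal nums base i) := by
        have h0 := pvSetFoldMap (pvRowVal nums base i) kk kk 0 (by omega)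
        simpa [List.range_eq_range'] using h0
      rw [hfold]
      have hmapc : (List.range kk).map (pvRowVal nums base i)
          = (List.range kk).map (pvRowVal nums (pvRows nums kk i) i) := by
        refine List.map_congr_left (fun j _ => ?_)
        refine pvRowValCongr nums base (pvRows nums kk i) i j (fun p hp => ?_)
        rw [hbase, pvGetDAppendLeft _ _ _ _ (by rw [pvRowsLength]; omega)]
      rw [hmapc]
      have h4 := pvSetAppend (pvRows nums kk i) zrow (List.replicate c zrow)
        ((List.range kk).map (pvRowVal nums (pvRows nums kk i) i))
      rw [pvRowsLength] at h4
      rw [hbase, List.replicate_succ, h4]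
      show _ = (pvRows nums kk i ++ [(List.range kk).map (pvRowVal nums (pvRows nums kk i) i)])
        ++ List.replicate c zrow
      rw [List.append_assoc, List.singleton_append]
    rw [hstep, ih (i + 1)]
    congr 1
    omega

theorem pvPortAEq (nums : List Int) (k : Int) :
    longest_increasing_subsequence_with_modification nums k
      = (List.range nums.length).foldl (fun m i =>
          (List.range (k + 1).toNat).foldl (fun m j =>
            max m (pvE nums (k + 1).toNat i j)) m) 0 := by
  have hdp : (List.range nums.length).foldl (fun dp i =>
      (List.range (k + 1).toNat).foldl (fun dp j =>
        dp.set i ((dp.getD i []).set j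
          ((List.range i).foldl (fun v p =>
            if nums.getD i 0 ≥ nums.getD p 0 then
              max v ((dp.getD p []).getD j 0 + 1)
            else if 0 < j then
              max v ((dp.getD p []).getD (j - 1) 0 + 1)
            else v) 1))) dp)
      (List.replicate nums.length (List.replicate (k + 1).toNat 0))
      = pvRows nums (k + 1).toNat nums.length := by
    have h0 := pvOuterAll nums (k + 1).toNat nums.length 0
    simpa [pvRows, List.range_eq_range'] using h0
  simp only [longest_increasing_subsequence_with_modification]
  rw [hdp]
  rfl

-- ---- max-fold algebra: swapping the nesting order of two max-accumulating folds ----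
theorem pvPull (g : Nat → Int) (l : List Nat) :
    ∀ b x : Int, l.foldl (fun a t => max a (g t)) (max b x)
      = max (l.foldl (fun a t => max a (g t)) b) x := by
  induction l with
  | nil => intro b x; rfl
  | cons t ts ih =>
    intro b x
    simp only [List.foldl_cons]
    rw [max_right_comm b x (g t), ih]

theorem pvFoldPull (F : Int → Nat → Int) (hF : ∀ b x j, F (max b x) j = max (F b j) x)
    (l : List Nat) : ∀ b x, l.foldl F (max b x) = max (l.foldl F b) x := by
  induction l with
  | nil => intro b x; rfl
  | cons t ts ih => intro b x; simp only [List.foldl_cons]; rw [hF, ih]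

theorem pvFoldCommute (F : Int → Nat → Int) (h : Nat → Int)
    (hF : ∀ b x j, F (max b x) j = max (F b j) x) (l : List Nat) :
    ∀ b, l.foldl (fun a j => max (F a j) (h j)) b
      = l.foldl (fun a j => max a (h j)) (l.foldl F b) := by
  induction l with
  | nil => intro b; rfl
  | cons j js ih =>
    intro b
    simp only [List.foldl_cons]
    rw [ih, pvFoldPull F hF js, pvPull]

theorem pvCommuteFold (G : Int → Int) (hG : ∀ b x, G (max b x) = max (G b) x)
    (h : Nat → Int) (l : List Nat) :
    ∀ b, G (l.foldl (fun a t => max a (h t)) b) = l.foldl (fun a t => max a (h t)) (G b) := by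
  induction l with
  | nil => intro b; rfl
  | cons t ts ih => intro b; simp only [List.foldl_cons]; rw [ih, hG]

theorem pvNestedSwap (e : Nat → Nat → Int) (jl : List Nat) :
    ∀ (il : List Nat) (b : Int),
      il.foldl (fun m i => jl.foldl (fun m j => max m (e i j)) m) b
        = jl.foldl (fun m j => il.foldl (fun m i => max m (e i j)) m) b := by
  intro il
  induction il with
  | nil =>
    intro b
    have : ∀ (l : List Nat) (b : Int), l.foldl (fun (m : Int) (_ : Nat) => m) b = b := by
      intro l; induction l with
      | nil => intro b; rfl
      | cons x xs ih => intro b; simp only [List.foldl_cons]; exact ih b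
    simp only [List.foldl_nil]
    exact (this jl b).symm
  | cons i₀ il' ih =>
    intro b
    simp only [List.foldl_cons]
    rw [ih]
    have hcolpull : ∀ (b x : Int) (j : Nat),
        il'.foldl (fun m i => max m (e i j)) (max b x)
          = max (il'.foldl (fun m i => max m (e i j)) b) x := by
      intro b x j; exact pvPull (fun i => e i j) il' b x
    have hG : ∀ b x : Int,
        jl.foldl (fun m j => il'.foldl (fun m i => max m (e i j)) m) (max b x)
          = max (jl.foldl (fun m j => il'.foldl (fun m i => max m (e i j)) m) b) x :=
      pvFoldPull _ (fun b x j => hcolpull b x j) jl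
    have h1 := pvFoldCommute (fun m j => il'.foldl (fun m i => max m (e i j)) m)
      (fun j => e i₀ j) (fun b x j => hcolpull b x j) jl b
    have h2 := pvFoldCongr jl
      (fun m j => il'.foldl (fun m i => max m (e i j)) (max m (e i₀ j)))
      (fun m j => max (il'.foldl (fun m i => max m (e i j)) m) (e i₀ j))
      (fun m j _ => hcolpull m (e i₀ j) j) b
    have h3 := pvCommuteFold
      (fun c => jl.foldl (fun m j => il'.foldl (fun m i => max m (e i j)) m) c)
      (fun b x => hG b x) (fun j => e i₀ j) jl b
    rw [h2, h1]
    exact h3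

-- ---- B-side models ----
def pvMle (nums : List Int) (kk j i : Nat) (y : Int) : Int :=
  (List.range i).foldl (fun m p => if nums.getD p 0 ≤ y then max m (pvE nums kk p j) else m) 0

def pvMall (nums : List Int) (kk j i : Nat) : Int :=
  (List.range i).foldl (fun m p => max m (pvE nums kk p j)) 0

def pvSemQ (f : List (Int × Int)) (y : Int) : Int :=
  f.foldl (fun m e => if e.1 ≤ y then max m e.2 else m) 0

def pvSortedF (f : List (Int × Int)) : Prop :=
  f.Pairwise (fun a b => a.1 < b.1 ∧ a.2 < b.2)

def pvPosF (f : List (Int × Int)) : Prop := ∀ e ∈ f, (1 : Int) ≤ e.2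

def pvPrevB (nums : List Int) (kk : Nat) : Nat → Option (List Int)
  | 0 => none
  | j' + 1 => some ((List.range nums.length).map (fun p => pvE nums kk p j'))

-- placeholder proofs follow
theorem pvMleNonneg (nums : List Int) (kk j i : Nat) (y : Int) : 0 ≤ pvMle nums kk j i y := by
  refine pvFoldGeInit _ _ (fun m p _ => ?_) 0
  split_ifs with h
  · exact le_max_left _ _
  · exact le_refl m

theorem pvMleSucc (nums : List Int) (kk j i : Nat) (y : Int) :
    pvMle nums kk j (i + 1) y
      = if nums.getD i 0 ≤ y then max (pvMle nums kk j i y) (pvE nums kk i j)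
        else pvMle nums kk j i y := by
  unfold pvMle
  rw [List.range_succ, List.foldl_append]
  rfl

theorem pvMallSucc (nums : List Int) (kk j i : Nat) :
    pvMall nums kk j (i + 1) = max (pvMall nums kk j i) (pvE nums kk i j) := by
  unfold pvMall
  rw [List.range_succ, List.foldl_append]
  rfl

-- dp is monotone in the modification budget
theorem pvMono (nums : List Int) (kk : Nat) :
    ∀ i, i < nums.length → ∀ j, j + 1 < kk →
      pvE nums kk i j ≤ pvE nums kk i (j + 1) := by
  intro i
  induction i using Nat.strong_induction_on with
  | _ i ih =>
    intro hi j hj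
    rw [pvEEq nums kk i j hi (by omega), pvEEq nums kk i (j + 1) hi hj,
      pvRowValE nums kk i j (by omega) (by omega), pvRowValE nums kk i (j + 1) (by omega) hj]
    refine pvFoldLeFold _ _ _ (fun v w p hp hvw => ?_) 1 1 (le_refl 1)
    have hpi : p < i := List.mem_range.mp hp
    by_cases hge : nums.getD i 0 ≥ nums.getD p 0
    · simp only [if_pos hge]
      exact max_le_max hvw (by
        have := ih p hpi (by omega) j hj
        omega)
    · simp only [if_neg hge, Nat.add_sub_cancel, if_pos (Nat.succ_pos j)]
      cases j with
      | zero =>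
        rw [if_neg (by omega : ¬ (0:Nat) < 0)]
        exact le_trans hvw (le_max_left _ _)
      | succ j'' =>
        simp only [if_pos (Nat.succ_pos j''), Nat.add_sub_cancel]
        refine max_le_max hvw ?_
        have := ih p hpi (by omega) j'' (by omega)
        omega

-- characterization of a dp cell by the two prefix maxima
theorem pvCellGen (nums : List Int) (kk j : Nat) (hj : j < kk) (i : Nat) (hi : i < nums.length) :
    pvE nums kk i j
      = max (pvMle nums kk j i (nums.getD i 0) + 1)
          (if 0 < j then pvMall nums kk (j - 1) i + 1 else 0) := by
  have hE : pvE nums kk i j = (List.range i).foldl (fun v p =>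
      if nums.getD i 0 ≥ nums.getD p 0 then max v (pvE nums kk p j + 1)
      else if 0 < j then max v (pvE nums kk p (j - 1) + 1)
      else v) 1 := by
    rw [pvEEq nums kk i j hi hj, pvRowValE nums kk i j (by omega) hj]
  set x := nums.getD i 0 with hx
  set F := (List.range i).foldl (fun v p =>
      if x ≥ nums.getD p 0 then max v (pvE nums kk p j + 1)
      else if 0 < j then max v (pvE nums kk p (j - 1) + 1)
      else v) 1 with hF
  have hmonoF : ∀ (m : Int) (p : Nat), p ∈ List.range i → m ≤
      (if x ≥ nums.getD p 0 then max m (pvE nums kk p j + 1)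
       else if 0 < j then max m (pvE nums kk p (j - 1) + 1) else m) := by
    intro m p _
    split_ifs with h1 h2
    · exact le_max_left _ _
    · exact le_max_left _ _
    · exact le_refl m
  have hF1 : (1 : Int) ≤ F := pvFoldGeInit _ _ hmonoF 1
  have hFge_le : ∀ p, p < i → nums.getD p 0 ≤ x → pvE nums kk p j + 1 ≤ F := by
    intro p hp hle
    refine pvFoldGeMem _ _ hmonoF p (List.mem_range.mpr hp) _ (fun m => ?_) 1
    rw [if_pos (show x ≥ nums.getD p 0 from hle)]
    exact le_max_right _ _
  have hFge_gt : ∀ p, p < i → ¬ nums.getD p 0 ≤ x → 0 < j → pvE nums kk p (j - 1) + 1 ≤ F := by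
    intro p hp hgt hjpos
    refine pvFoldGeMem _ _ hmonoF p (List.mem_range.mpr hp) _ (fun m => ?_) 1
    rw [if_neg (show ¬ x ≥ nums.getD p 0 from hgt), if_pos hjpos]
    exact le_max_right _ _
  have hMleF : pvMle nums kk j i x + 1 ≤ F := by
    have : pvMle nums kk j i x ≤ F - 1 := by
      refine pvFoldLe _ _ _ (fun m p hp hm => ?_) 0 (by omega)
      split_ifs with hle
      · have := hFge_le p (List.mem_range.mp hp) hle
        exact max_le hm (by omega)
      · exact hm
    omega
  have hMallF : 0 < j → pvMall nums kk (j - 1) i + 1 ≤ F := by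
    intro hjpos
    have : pvMall nums kk (j - 1) i ≤ F - 1 := by
      refine pvFoldLe _ _ _ (fun m p hp hm => ?_) 0 (by omega)
      have hpi : p < i := List.mem_range.mp hp
      refine max_le hm ?_
      by_cases hle : nums.getD p 0 ≤ x
      · have h1 : pvE nums kk p (j - 1) ≤ pvE nums kk p j := by
          have := pvMono nums kk p (by omega) (j - 1) (by omega)
          have hjj : j - 1 + 1 = j := by omega
          rw [hjj] at this
          exact this
        have := hFge_le p hpi hle
        omega
      · have := hFge_gt p hpi hle hjpos
        omega
    omega
  have hFle : F ≤ max (pvMle nums kk j i x + 1) (if 0 < j then pvMall nums kk (j - 1) i + 1 else 0) := by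
    set M := max (pvMle nums kk j i x + 1) (if 0 < j then pvMall nums kk (j - 1) i + 1 else 0) with hM
    refine pvFoldLe _ _ _ (fun m p hp hm => ?_) 1 (by
      have := pvMleNonneg nums kk j i x
      have h2 : pvMle nums kk j i x + 1 ≤ M := le_max_left _ _
      omega)
    have hpi : p < i := List.mem_range.mp hp
    split_ifs with hle hjpos
    · refine max_le hm ?_
      have hmem : pvE nums kk p j ≤ pvMle nums kk j i x := by
        refine pvFoldGeMem _ _ (fun m q _ => ?_) p (List.mem_range.mpr hpi) _ (fun m => ?_) 0
        · split_ifs with h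
          · exact le_max_left _ _
          · exact le_refl m
        · rw [if_pos (show nums.getD p 0 ≤ x from hle)]
          exact le_max_right _ _
      have h2 : pvMle nums kk j i x + 1 ≤ M := le_max_left _ _
      omega
    · refine max_le hm ?_
      have hmem : pvE nums kk p (j - 1) ≤ pvMall nums kk (j - 1) i :=
        pvFoldGeMem (fun m q => max m (pvE nums kk q (j - 1))) (List.range i)
          (fun m q _ => le_max_left _ _) p (List.mem_range.mpr hpi) _
          (fun m => le_max_right _ _) 0
      have h2 : (if 0 < j then pvMall nums kk (j - 1) i + 1 else 0) ≤ M := le_max_right _ _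
      rw [if_pos hjpos] at h2
      omega
    · exact hm
  rw [hE]
  refine le_antisymm hFle (max_le hMleF ?_)
  by_cases hjpos : 0 < j
  · rw [if_pos hjpos]; exact hMallF hjpos
  · rw [if_neg hjpos]; omega

theorem pvCell0 (nums : List Int) (kk : Nat) (hk : 0 < kk) (i : Nat) (hi : i < nums.length) :
    pvE nums kk i 0 = pvMle nums kk 0 i (nums.getD i 0) + 1 := by
  rw [pvCellGen nums kk 0 hk i hi, if_neg (by omega : ¬ (0:Nat) < 0)]
  have := pvMleNonneg nums kk 0 i (nums.getD i 0)
  rw [max_eq_left (by omega)]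

theorem pvCellS (nums : List Int) (kk j' : Nat) (hj : j' + 1 < kk) (i : Nat)
    (hi : i < nums.length) :
    pvE nums kk i (j' + 1)
      = max (pvMle nums kk (j' + 1) i (nums.getD i 0) + 1) (pvMall nums kk j' i + 1) := by
  rw [pvCellGen nums kk (j' + 1) hj i hi, if_pos (Nat.succ_pos j'), Nat.add_sub_cancel]

-- query over a sorted front computes the prefix maximum
theorem pvFoldIdConst {α : Type} (l : List α) (g : Int → α → Int)
    (h : ∀ m a, a ∈ l → g m a = m) : ∀ b, l.foldl g b = b := by
  induction l with
  | nil => intro b; rfl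
  | cons a as ih =>
    intro b
    simp only [List.foldl_cons, h b a (by simp)]
    exact ih (fun m a' ha' => h m a' (by simp [ha'])) b

theorem pvQueryAuxChar (x : Int) :
    ∀ (f : List (Int × Int)), pvSortedF f → ∀ q, (∀ e ∈ f, q ≤ e.2) →
      pvQueryAux x f q = f.foldl (fun m e => if e.1 ≤ x then max m e.2 else m) q := by
  intro f
  induction f with
  | nil => intro _ q _; rfl
  | cons e rest ih =>
    intro hs q hq
    have hs' : pvSortedF rest := (List.pairwise_cons.mp hs).2
    have hrel := (List.pairwise_cons.mp hs).1
    by_cases hex : e.1 ≤ x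
    · simp only [pvQueryAux, if_pos hex, List.foldl_cons]
      rw [max_eq_right (hq e (by simp))]
      exact ih hs' e.2 (fun e' he' => le_of_lt (hrel e' he').2)
    · simp only [pvQueryAux, List.foldl_cons, if_neg hex]
      rw [pvFoldIdConst rest _ (fun m e' he' => by
        have hlt : x < e'.1 := lt_trans (by omega) (hrel e' he').1
        rw [if_neg (by omega : ¬ e'.1 ≤ x)])]

theorem pvQueryEqSem (f : List (Int × Int)) (x : Int) (hs : pvSortedF f) (hp : pvPosF f) :
    pvQuery f x = pvSemQ f x := by
  unfold pvQuery pvSemQ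
  exact pvQueryAuxChar x f hs 0 (fun e he => by have := hp e he; omega)

theorem pvSemQNonneg (f : List (Int × Int)) (y : Int) : 0 ≤ pvSemQ f y := by
  refine pvFoldGeInit _ _ (fun m e _ => ?_) 0
  split_ifs with h
  · exact le_max_left _ _
  · exact le_refl m

theorem pvSemQLe (f : List (Int × Int)) (y c : Int)
    (h : ∀ e ∈ f, e.1 ≤ y → e.2 ≤ c) (hc : 0 ≤ c) : pvSemQ f y ≤ c := by
  refine pvFoldLe _ _ _ (fun m e he hm => ?_) 0 hc
  split_ifs with hy
  · exact max_le hm (h e he hy)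
  · exact hm

theorem pvLeSemQ (f : List (Int × Int)) (y : Int) (e : Int × Int) (he : e ∈ f)
    (hy : e.1 ≤ y) : e.2 ≤ pvSemQ f y := by
  refine pvFoldGeMem _ _ (fun m e' _ => ?_) e he _ (fun m => ?_) 0
  · split_ifs with h
    · exact le_max_left _ _
    · exact le_refl m
  · rw [if_pos hy]; exact le_max_right _ _

theorem pvMemInsertF (f : List (Int × Int)) (x l : Int) (e : Int × Int) :
    e ∈ pvInsertF f x l ↔ (e ∈ f ∧ e.1 < x) ∨ e = (x, l) ∨ (e ∈ f ∧ x ≤ e.1 ∧ l < e.2) := by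
  simp [pvInsertF, List.mem_filter, List.mem_append]

-- insert maintains the front invariant
theorem pvInsertSorted (f : List (Int × Int)) (x l : Int) (hs : pvSortedF f)
    (hql : pvSemQ f x < l) : pvSortedF (pvInsertF f x l) := by
  unfold pvInsertF pvSortedF
  rw [List.pairwise_append]
  refine ⟨List.Pairwise.sublist List.filter_sublist hs, ?_, ?_⟩
  · rw [List.pairwise_cons]
    constructor
    · intro e' he'
      have hmem := List.mem_filter.mp he'
      have hcond : x ≤ e'.1 ∧ l < e'.2 := by
        have := hmem.2; simp at this; exact this
      constructor
      · rcases lt_or_eq_of_le hcond.1 with h | h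
        · exact h
        · exfalso
          have : e'.2 ≤ pvSemQ f x := pvLeSemQ f x e' hmem.1 (by omega)
          omega
      · exact hcond.2
    · exact List.Pairwise.sublist List.filter_sublist hs
  · intro a ha b hb
    have hamem := List.mem_filter.mp ha
    have hacond : a.1 < x := by have := hamem.2; simp at this; exact this
    have ha2 : a.2 < l := by
      have : a.2 ≤ pvSemQ f x := pvLeSemQ f x a hamem.1 (le_of_lt hacond)
      omega
    rcases List.mem_cons.mp hb with h | h
    · subst h; exact ⟨hacond, ha2⟩
    · have hbmem := List.mem_filter.mp h
      have hbcond : x ≤ b.1 ∧ l < b.2 := by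
        have := hbmem.2; simp at this; exact this
      exact ⟨by omega, by omega⟩

theorem pvInsertPos (f : List (Int × Int)) (x l : Int) (hp : pvPosF f) (hl : 1 ≤ l) :
    pvPosF (pvInsertF f x l) := by
  intro e he
  rcases (pvMemInsertF f x l e).mp he with h | h | h
  · exact hp e h.1
  · subst h; exact hl
  · exact hp e h.1

theorem pvInsertSemQ (f : List (Int × Int)) (x l : Int) (_hql : pvSemQ f x < l)
    (hl : 1 ≤ l) (y : Int) :
    pvSemQ (pvInsertF f x l) y = if x ≤ y then max (pvSemQ f y) l else pvSemQ f y := by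
  by_cases hxy : x ≤ y
  · rw [if_pos hxy]
    refine le_antisymm ?_ (max_le ?_ ?_)
    · refine pvSemQLe _ _ _ (fun e he hey => ?_) (by
        have := pvSemQNonneg f y; omega)
      rcases (pvMemInsertF f x l e).mp he with h | h | h
      · exact le_trans (pvLeSemQ f y e h.1 hey) (le_max_left _ _)
      · subst h; exact le_max_right _ _
      · exact le_trans (pvLeSemQ f y e h.1 hey) (le_max_left _ _)
    · refine pvSemQLe _ _ _ (fun e he hey => ?_) (pvSemQNonneg _ _)
      by_cases hex : e.1 < x
      · exact pvLeSemQ _ y e ((pvMemInsertF f x l e).mpr (Or.inl ⟨he, hex⟩)) hey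
      · by_cases hdom : l < e.2
        · exact pvLeSemQ _ y e ((pvMemInsertF f x l e).mpr (Or.inr (Or.inr ⟨he, by omega, hdom⟩))) hey
        · have : l ≤ pvSemQ (pvInsertF f x l) y :=
            pvLeSemQ _ y (x, l) ((pvMemInsertF f x l (x, l)).mpr (Or.inr (Or.inl rfl))) hxy
          omega
    · exact pvLeSemQ _ y (x, l) ((pvMemInsertF f x l (x, l)).mpr (Or.inr (Or.inl rfl))) hxy
  · rw [if_neg hxy]
    refine le_antisymm ?_ ?_
    · refine pvSemQLe _ _ _ (fun e he hey => ?_) (pvSemQNonneg _ _)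
      rcases (pvMemInsertF f x l e).mp he with h | h | h
      · exact pvLeSemQ f y e h.1 hey
      · subst h; exact absurd hey hxy
      · exfalso; omega
    · refine pvSemQLe _ _ _ (fun e he hey => ?_) (pvSemQNonneg _ _)
      have hex : e.1 < x := by omega
      exact pvLeSemQ _ y e ((pvMemInsertF f x l e).mpr (Or.inl ⟨he, hex⟩)) hey

-- the inner-loop invariant of B (one budget column)
theorem pvInner (nums : List Int) (kk j : Nat) (hj : j < kk) :
    ∀ c, c ≤ nums.length → ∀ b0 : Int,
      pvSortedF ((List.range c).foldl (pvStepB nums (pvPrevB nums kk j)) ([], [], 0, b0)).1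
      ∧ pvPosF ((List.range c).foldl (pvStepB nums (pvPrevB nums kk j)) ([], [], 0, b0)).1
      ∧ (∀ y, pvSemQ ((List.range c).foldl (pvStepB nums (pvPrevB nums kk j)) ([], [], 0, b0)).1 y
            = pvMle nums kk j c y)
      ∧ ((List.range c).foldl (pvStepB nums (pvPrevB nums kk j)) ([], [], 0, b0)).2.1
          = (List.range c).map (fun p => pvE nums kk p j)
      ∧ ((List.range c).foldl (pvStepB nums (pvPrevB nums kk j)) ([], [], 0, b0)).2.2.1
          = (if j = 0 then 0 else pvMall nums kk (j - 1) c)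
      ∧ ((List.range c).foldl (pvStepB nums (pvPrevB nums kk j)) ([], [], 0, b0)).2.2.2
          = (List.range c).foldl (fun m p => max m (pvE nums kk p j)) b0 := by
  intro c
  induction c with
  | zero =>
    intro _ b0
    refine ⟨List.Pairwise.nil, fun e he => absurd he (List.not_mem_nil), fun y => rfl, rfl, ?_, rfl⟩
    split_ifs <;> rfl
  | succ c ihc =>
    intro hc b0
    obtain ⟨hS, hP, hQ, hCur, hPM, hB⟩ := ihc (by omega) b0
    set r := (List.range c).foldl (pvStepB nums (pvPrevB nums kk j)) ([], [], 0, b0) with hr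
    have hstep : (List.range (c + 1)).foldl (pvStepB nums (pvPrevB nums kk j)) ([], [], 0, b0)
        = pvStepB nums (pvPrevB nums kk j) r c := by
      rw [List.range_succ, List.foldl_append]
      rfl
    set x := nums.getD c 0 with hx
    -- the computed length equals pvE c j
    have hq : pvQuery r.1 x = pvMle nums kk j c x := by
      rw [pvQueryEqSem r.1 x hS hP]; exact hQ x
    have hlen : (match pvPrevB nums kk j with
        | some _ => if r.2.2.1 + 1 > pvQuery r.1 x + 1 then r.2.2.1 + 1 else pvQuery r.1 x + 1
        | none => pvQuery r.1 x + 1) = pvE nums kk c j := by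
      cases j with
      | zero =>
        show pvQuery r.1 x + 1 = pvE nums kk c 0
        rw [hq, pvCell0 nums kk hj c (by omega)]
      | succ j' =>
        show (if r.2.2.1 + 1 > pvQuery r.1 x + 1 then r.2.2.1 + 1 else pvQuery r.1 x + 1)
          = pvE nums kk c (j' + 1)
        rw [if_neg (Nat.succ_ne_zero j'), Nat.add_sub_cancel] at hPM
        rw [hq, hPM, pvIfMax, pvCellS nums kk j' hj c (by omega)]
    -- length is a genuinely new maximum for the front at value x
    have hEgt : pvSemQ r.1 x < pvE nums kk c j := by
      rw [hQ x]
      cases j with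
      | zero => rw [pvCell0 nums kk hj c (by omega), ← hx]; omega
      | succ j' =>
        rw [pvCellS nums kk j' hj c (by omega), ← hx]
        have : pvMle nums kk (j' + 1) c x + 1 ≤ max (pvMle nums kk (j' + 1) c x + 1)
            (pvMall nums kk j' c + 1) := le_max_left _ _
        omega
    have hE1 : 1 ≤ pvE nums kk c j := by
      have := pvSemQNonneg r.1 x
      omega
    rw [hstep]
    rw [show (pvStepB nums (pvPrevB nums kk j) r c) = (pvInsertF r.1 x
        (match pvPrevB nums kk j with
          | some _ => if r.2.2.1 + 1 > pvQuery r.1 x + 1 then r.2.2.1 + 1 else pvQuery r.1 x + 1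
          | none => pvQuery r.1 x + 1),
        r.2.1 ++ [(match pvPrevB nums kk j with
          | some _ => if r.2.2.1 + 1 > pvQuery r.1 x + 1 then r.2.2.1 + 1 else pvQuery r.1 x + 1
          | none => pvQuery r.1 x + 1)],
        (match pvPrevB nums kk j with
          | some pv => if pv.getD c 0 > r.2.2.1 then pv.getD c 0 else r.2.2.1
          | none => r.2.2.1),
        (if (match pvPrevB nums kk j with
          | some _ => if r.2.2.1 + 1 > pvQuery r.1 x + 1 then r.2.2.1 + 1 else pvQuery r.1 x + 1
          | none => pvQuery r.1 x + 1) > r.2.2.2 then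
            (match pvPrevB nums kk j with
              | some _ => if r.2.2.1 + 1 > pvQuery r.1 x + 1 then r.2.2.1 + 1 else pvQuery r.1 x + 1
              | none => pvQuery r.1 x + 1) else r.2.2.2)) from by
      cases hpb : pvPrevB nums kk j <;> rfl]
    rw [hlen]
    refine ⟨pvInsertSorted r.1 x _ hS hEgt, ?_, ?_, ?_, ?_, ?_⟩
    · exact pvInsertPos r.1 x _ hP hE1
    · intro y
      rw [pvInsertSemQ r.1 x _ hEgt hE1 y, pvMleSucc nums kk j c y, hQ y, ← hx]
    · rw [hCur, List.range_succ, List.map_append]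
      rfl
    · cases j with
      | zero =>
        rw [if_pos rfl] at hPM ⊢
        exact hPM
      | succ j' =>
        rw [if_neg (Nat.succ_ne_zero j'), Nat.add_sub_cancel] at hPM ⊢
        show (if ((List.range nums.length).map (fun p => pvE nums kk p j')).getD c 0 > r.2.2.1
            then ((List.range nums.length).map (fun p => pvE nums kk p j')).getD c 0
            else r.2.2.1) = pvMall nums kk j' (c + 1)
        rw [pvMapRangeGetD _ _ _ (by omega), hPM, pvIfMax, pvMallSucc]
    · rw [hB, pvIfMax, List.range_succ, List.foldl_append]
      rfl

-- B's outer loop accumulates the column maxima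
theorem pvPortBEq (nums : List Int) (k : Int) :
    longest_increasing_subsequence_with_modification_alt nums k
      = (List.range (k + 1).toNat).foldl (fun b j =>
          (List.range nums.length).foldl (fun m i =>
            max m (pvE nums (k + 1).toNat i j)) b) 0 := by
  set kk := (k + 1).toNat with hkk
  have hinv : ∀ m, m ≤ kk →
      (List.range m).foldl (fun (s : Int × Option (List Int)) _ =>
        let r := (List.range nums.length).foldl (pvStepB nums s.2) ([], [], 0, s.1)
        (r.2.2.2, some r.2.1)) ((0 : Int), (none : Option (List Int)))
      = ((List.range m).foldl (fun b j =>
          (List.range nums.length).foldl (fun m' i =>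
            max m' (pvE nums kk i j)) b) 0, pvPrevB nums kk m) := by
    intro m
    induction m with
    | zero => intro _; rfl
    | succ q ihq =>
      intro hq
      rw [List.range_succ, List.foldl_append, List.foldl_append, ihq (by omega)]
      simp only [List.foldl_cons, List.foldl_nil]
      obtain ⟨_, _, _, hCur, _, hB⟩ := pvInner nums kk q (by omega) nums.length (le_refl _)
        ((List.range q).foldl (fun b j =>
          (List.range nums.length).foldl (fun m' i => max m' (pvE nums kk i j)) b) 0)
      rw [Prod.ext_iff]
      refine ⟨hB, ?_⟩
      rw [hCur]
      rfl
  simp only [longest_increasing_subsequence_with_modification_alt]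
  rw [hinv kk (le_refl kk)]

theorem pvMain (nums : List Int) (k : Int) :
    longest_increasing_subsequence_with_modification nums k
      = longest_increasing_subsequence_with_modification_alt nums k := by
  rw [pvPortAEq, pvPortBEq]
  exact pvNestedSwap (fun i j => pvE nums (k + 1).toNat i j)
    (List.range (k + 1).toNat) (List.range nums.length) 0

-- ===== VERDICT (by name: the statement is the Claim_ definition above) =====
theorem longest_increasing_subsequence_with_modification_spec : Claim_equal_longest_increasing_subsequence_with_modification := by
  intro nums k _
  unfold Spec_longest_increasing_subsequence_with_modification
  exact pvMain nums k
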